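-- pv_equiv track=rewrite | github.com/AnhaoROMA/leetcode | GreedyAlgorithm/665 non-decreasing array.py | check
-- ===== SOURCE A (Python) =====
-- def check(nums: list[int]) -> bool:
--     length = len(nums)
--     tmp = [
--         nums[0]
--     ]
--     for i in range(1, length):
--         d = nums[i]
--         if d >= tmp[-1]:
--             tmp.append(d)
--         else:
--             length_tmp = len(tmp)
--             for j in range(length_tmp):
--                 if tmp[j] > d:
--                     tmp[j] = d
--                     break
--     if length - len(tmp) <= 1:
--         return True
--     else:
--         return False
-- ===== SOURCE B (Python) =====
-- def _bisect_right(a, x):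
--     lo, hi = 0, len(a)
--     while lo < hi:
--         mid = (lo + hi) // 2
--         if x < a[mid]:
--             hi = mid
--         else:
--             lo = mid + 1
--     return lo
--
--
-- def check(nums: list[int]) -> bool:
--     # patience piles for longest non-decreasing subsequence, binary search per element
--     tops = [nums[0]]
--     for d in nums[1:]:
--         k = _bisect_right(tops, d)
--         if k == len(tops):
--             tops.append(d)
--         else:
--             tops[k] = d
--     return len(nums) - len(tops) <= 1
-- ===== Notes on version B (the rewrite author's own statement) =====
-- stated objective: faster
-- what changed: Replaces A's linear scan for the pile to overwrite with a hand-rolled binary search (bisect_right), turning the longest-non-decreasing-subsequence patience pass from O(n^2) to O(n log n).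
import Mathlib
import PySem

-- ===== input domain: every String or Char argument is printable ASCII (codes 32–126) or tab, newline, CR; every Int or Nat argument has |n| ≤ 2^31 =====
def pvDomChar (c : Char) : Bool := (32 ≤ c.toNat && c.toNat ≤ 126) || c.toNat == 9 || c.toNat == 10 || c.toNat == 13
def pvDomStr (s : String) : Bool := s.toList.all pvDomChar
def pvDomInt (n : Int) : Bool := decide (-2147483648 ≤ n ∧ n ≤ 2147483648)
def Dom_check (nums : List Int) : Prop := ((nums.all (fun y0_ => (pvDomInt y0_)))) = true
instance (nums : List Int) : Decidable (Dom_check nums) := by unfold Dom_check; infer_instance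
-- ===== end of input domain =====

-- B replaces A's inner linear scan by a binary search (patience piles); return value only.

-- ===== PORT A =====
-- inner loop of A: set the first element greater than d to d (leaves tmp unchanged if none)
def replaceFirst (tmp : List Int) (d : Int) : List Int :=
  match tmp with
  | [] => []
  | y :: ys => if y > d then d :: ys else y :: replaceFirst ys d

def check (nums : List Int) : Bool :=
  match nums with
  | [] => false  -- Python raises IndexError on []; excluded by Pre_check
  | x :: rest =>
    let tmp := rest.foldl (fun tmp d =>
      if d ≥ tmp.getLastD 0 then tmp ++ [d] else replaceFirst tmp d) [x]
    decide ((nums.length : Int) - (tmp.length : Int) ≤ 1)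

-- ===== PORT B =====
-- hand-rolled bisect_right from Source B (while lo < hi: mid := (lo+hi)/2 …)
def bisectRight (a : List Int) (x : Int) (lo hi : Nat) : Nat :=
  if _h : lo < hi then
    let mid := (lo + hi) / 2
    if x < a.getD mid 0 then bisectRight a x lo mid else bisectRight a x (mid + 1) hi
  else lo
termination_by hi - lo
decreasing_by all_goals omega

def check_alt (nums : List Int) : Bool :=
  match nums with
  | [] => false  -- Source B raises IndexError on []; excluded by Pre_check
  | x :: rest =>
    let tops := rest.foldl (fun tops d =>
      let k := bisectRight tops d 0 tops.length
      if k = tops.length then tops ++ [d] else tops.set k d) [x]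
    decide ((nums.length : Int) - (tops.length : Int) ≤ 1)

-- ===== PRECONDITION & SPEC =====
-- Pre_ excludes only the empty list, on which both Pythons raise IndexError (nums[0]).
def Pre_check (nums : List Int) : Prop := nums ≠ []
instance (nums : List Int) : Decidable (Pre_check nums) := by unfold Pre_check; infer_instance
def pvWitness_check : List Int := ([3, 4, 2, 3])

def Spec_check (nums : List Int) (out : Bool) : Prop := out = check_alt nums
instance (nums : List Int) (out : Bool) : Decidable (Spec_check nums out) := by unfold Spec_check; infer_instance

-- ===== CLAIM (what is proved, stated in full; the proofs are below) =====
def Claim_equal_check : Prop := ∀ (nums : List Int), Dom_check nums → Pre_check nums → Spec_check nums (check nums)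

-- ===== LEMMAS AND PROOFS =====

-- replaceFirst is "set at the first index whose element exceeds d"
theorem replaceFirst_eq_set (tmp : List Int) (d : Int) :
    replaceFirst tmp d = tmp.set (tmp.findIdx (fun y => decide (d < y))) d := by
  induction tmp with
  | nil => rfl
  | cons y ys ih =>
    simp only [replaceFirst, List.findIdx_cons]
    by_cases h : d < y
    · simp [h]
    · simp [h, ih]

-- the elements of replaceFirst tmp d are old elements or d
theorem mem_replaceFirst {z : Int} {tmp : List Int} {d : Int}
    (h : z ∈ replaceFirst tmp d) : z ∈ tmp ∨ z = d := by
  induction tmp with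
  | nil => simp [replaceFirst] at h
  | cons y ys ih =>
    simp only [replaceFirst] at h
    split at h
    · rcases List.mem_cons.mp h with h | h
      · right; exact h
      · left; exact List.mem_cons_of_mem _ h
    · rcases List.mem_cons.mp h with h | h
      · left; simp [h]
      · rcases ih h with h | h
        · left; exact List.mem_cons_of_mem _ h
        · right; exact h

theorem replaceFirst_length (tmp : List Int) (d : Int) :
    (replaceFirst tmp d).length = tmp.length := by
  rw [replaceFirst_eq_set]; simp

-- replaceFirst preserves sortedness
theorem replaceFirst_sorted {tmp : List Int} {d : Int}
    (h : List.Pairwise (· ≤ ·) tmp) :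
    List.Pairwise (· ≤ ·) (replaceFirst tmp d) := by
  induction tmp with
  | nil => exact h
  | cons y ys ih =>
    rcases List.pairwise_cons.mp h with ⟨hy, hys⟩
    simp only [replaceFirst]
    split
    · rename_i hd
      exact List.pairwise_cons.mpr ⟨fun z hz => le_trans (le_of_lt hd) (hy z hz), hys⟩
    · rename_i hd
      refine List.pairwise_cons.mpr ⟨?_, ih hys⟩
      intro z hz
      rcases mem_replaceFirst hz with h' | h'
      · exact hy z h'
      · omega

-- every element of a sorted nonempty list is ≤ its last element
theorem sorted_le_getLastD {tmp : List Int} (h : List.Pairwise (· ≤ ·) tmp)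
    {y : Int} (hy : y ∈ tmp) : y ≤ tmp.getLastD 0 := by
  induction tmp with
  | nil => simp at hy
  | cons a t ih =>
    rcases List.pairwise_cons.mp h with ⟨ha, ht⟩
    cases t with
    | nil => simp at hy; simp [hy]
    | cons b t' =>
      have hm : (b :: t').getLastD 0 ∈ b :: t' := by
        rw [List.getLastD_cons]; exact List.getLastD_mem_cons ..
      rcases List.mem_cons.mp hy with hy | hy
      · subst hy; simpa using ha _ hm
      · simpa using ih ht hy

-- sorted lists are monotone in the index
theorem sorted_getElem_le {a : List Int} (hs : List.Pairwise (· ≤ ·) a) {i j : Nat}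
    (hij : i ≤ j) (hj : j < a.length) : a[i]'(by omega) ≤ a[j] := by
  rcases Nat.lt_or_eq_of_le hij with h | h
  · exact List.pairwise_iff_getElem.mp hs i j (by omega) hj h
  · subst h; exact le_refl _

-- bisectRight computes findIdx (x < ·) on a sorted list (auxiliary, fueled induction)
theorem bisect_aux {a : List Int} (hs : List.Pairwise (· ≤ ·) a) (x : Int) :
    ∀ (n lo hi : Nat), hi - lo ≤ n →
      lo ≤ a.findIdx (fun y => decide (x < y)) →
      a.findIdx (fun y => decide (x < y)) ≤ hi → hi ≤ a.length →
      bisectRight a x lo hi = a.findIdx (fun y => decide (x < y)) := by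
  intro n
  induction n with
  | zero =>
    intro lo hi hn hlo hhi hlen
    rw [bisectRight]
    simp only [dif_neg (by omega : ¬ lo < hi)]
    omega
  | succ n ih =>
    intro lo hi hn hlo hhi hlen
    rw [bisectRight]
    by_cases hlt : lo < hi
    · simp only [dif_pos hlt]
      have hmidlt : (lo + hi) / 2 < a.length := by omega
      have hget : a.getD ((lo + hi) / 2) 0 = a[(lo + hi) / 2] := List.getD_eq_getElem _ _ hmidlt
      by_cases hx : x < a.getD ((lo + hi) / 2) 0
      · simp only [if_pos hx]
        have hF : a.findIdx (fun y => decide (x < y)) ≤ (lo + hi) / 2 := by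
          by_contra hc
          have := List.not_of_lt_findIdx (p := fun y => decide (x < y))
            (xs := a) (i := (lo + hi) / 2) (by omega)
          rw [hget] at hx
          rw [decide_eq_false_iff_not] at this
          exact this hx
        exact ih lo ((lo + hi) / 2) (by omega) hlo hF (by omega)
      · simp only [if_neg hx]
        have hF : (lo + hi) / 2 + 1 ≤ a.findIdx (fun y => decide (x < y)) := by
          by_contra hc
          have hFlt : a.findIdx (fun y => decide (x < y)) < a.length := by omega
          have hp := List.findIdx_getElem (p := fun y => decide (x < y)) (xs := a) (w := hFlt)
          have hmono : a[a.findIdx (fun y => decide (x < y))]'hFlt ≤ a[(lo + hi) / 2] :=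
            sorted_getElem_le hs (by omega) hmidlt
          rw [hget] at hx
          simp only [decide_eq_true_eq] at hp
          omega
        exact ih ((lo + hi) / 2 + 1) hi (by omega) hF hhi hlen
    · simp only [dif_neg hlt]
      omega

theorem bisectRight_eq_findIdx {a : List Int} (hs : List.Pairwise (· ≤ ·) a) (x : Int) :
    bisectRight a x 0 a.length = a.findIdx (fun y => decide (x < y)) := by
  exact bisect_aux hs x a.length 0 a.length (by omega) (by omega)
    List.findIdx_le_length (le_refl _)

theorem getLastD_mem {tmp : List Int} (hne : tmp ≠ []) : tmp.getLastD 0 ∈ tmp := by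
  cases tmp with
  | nil => exact absurd rfl hne
  | cons a t => rw [List.getLastD_cons]; exact List.getLastD_mem_cons ..

-- one step of A equals one step of B on a sorted nonempty pile list
theorem step_eq {tmp : List Int} (d : Int) (hs : List.Pairwise (· ≤ ·) tmp) (hne : tmp ≠ []) :
    (if d ≥ tmp.getLastD 0 then tmp ++ [d] else replaceFirst tmp d)
    = (let k := bisectRight tmp d 0 tmp.length;
       if k = tmp.length then tmp ++ [d] else tmp.set k d) := by
  simp only [bisectRight_eq_findIdx hs d]
  by_cases hd : d ≥ tmp.getLastD 0
  · have hF : tmp.findIdx (fun y => decide (d < y)) = tmp.length := by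
      rw [List.findIdx_eq_length]
      intro y hy
      have := sorted_le_getLastD hs hy
      simp only [decide_eq_false_iff_not]
      omega
    rw [if_pos hd]
    simp only [hF, if_true]
  · have hF : tmp.findIdx (fun y => decide (d < y)) < tmp.length := by
      rw [List.findIdx_lt_length]
      exact ⟨tmp.getLastD 0, getLastD_mem hne, by simp only [decide_eq_true_eq]; omega⟩
    simp only [if_neg hd, if_neg (by omega : ¬ tmp.findIdx (fun y => decide (d < y)) = tmp.length)]
    exact replaceFirst_eq_set tmp d

-- A's step preserves sortedness and nonemptiness
theorem step_sorted {tmp : List Int} (d : Int) (hs : List.Pairwise (· ≤ ·) tmp) :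
    List.Pairwise (· ≤ ·) (if d ≥ tmp.getLastD 0 then tmp ++ [d] else replaceFirst tmp d) := by
  by_cases hd : d ≥ tmp.getLastD 0
  · rw [if_pos hd, List.pairwise_append]
    refine ⟨hs, by simp, ?_⟩
    intro y hy z hz
    simp only [List.mem_singleton] at hz
    subst hz
    have := sorted_le_getLastD hs hy
    omega
  · rw [if_neg hd]
    exact replaceFirst_sorted hs

theorem step_ne {tmp : List Int} (d : Int) (hne : tmp ≠ []) :
    (if d ≥ tmp.getLastD 0 then tmp ++ [d] else replaceFirst tmp d) ≠ [] := by
  by_cases hd : d ≥ tmp.getLastD 0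
  · rw [if_pos hd]; simp
  · rw [if_neg hd]
    intro hc
    have := replaceFirst_length tmp d
    rw [hc] at this
    simp at this
    exact hne (List.eq_nil_of_length_eq_zero this.symm)

-- main fold invariant: under sortedness the two folds agree
theorem fold_eq (rest : List Int) : ∀ (tmp : List Int), List.Pairwise (· ≤ ·) tmp → tmp ≠ [] →
    rest.foldl (fun tmp d =>
      if d ≥ tmp.getLastD 0 then tmp ++ [d] else replaceFirst tmp d) tmp
    = rest.foldl (fun tops d =>
      let k := bisectRight tops d 0 tops.length
      if k = tops.length then tops ++ [d] else tops.set k d) tmp := by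
  induction rest with
  | nil => intro tmp _ _; rfl
  | cons d rest ih =>
    intro tmp hs hne
    simp only [List.foldl_cons]
    rw [← step_eq d hs hne]
    exact ih _ (step_sorted d hs) (step_ne d hne)

-- ===== VERDICT (by name: the statement is the Claim_ definition above) =====
theorem check_spec : Claim_equal_check := by
  intro nums _ hpre
  unfold Spec_check
  cases nums with
  | nil => exact absurd rfl hpre
  | cons x rest =>
    simp only [check, check_alt]
    rw [fold_eq rest [x] (by simp) (by simp)]
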